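-- pv_equiv track=rewrite | github.com/basiclab/prompt_mog | pipeline/common.py | accumulative_concat
-- ===== SOURCE A (Python) =====
-- def accumulative_concat(prompt: str) -> str:
--     prompts = [prompt.strip() for prompt in prompt.split("<br>")]
--
--     accum_list = [prompts[0]]
--     cur_prompt = prompts[0]
--
--     for prompt in prompts[1:]:
--         accum_list.append(cur_prompt + " " + prompt)
--         cur_prompt = accum_list[-1]
--
--     return accum_list
-- ===== SOURCE B (Python) =====
-- def accumulative_concat(prompt: str) -> str:
--     parts = [p.strip() for p in prompt.split("<br>")]
--     return [" ".join(parts[:i + 1]) for i in range(len(parts))]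
-- ===== Notes on version B (the rewrite author's own statement) =====
-- stated objective: simpler
-- what changed: Replaces the running cur_prompt accumulator loop with a comprehension that rebuilds each prefix independently by space-joining the slice parts[:i+1].
import Mathlib
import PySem

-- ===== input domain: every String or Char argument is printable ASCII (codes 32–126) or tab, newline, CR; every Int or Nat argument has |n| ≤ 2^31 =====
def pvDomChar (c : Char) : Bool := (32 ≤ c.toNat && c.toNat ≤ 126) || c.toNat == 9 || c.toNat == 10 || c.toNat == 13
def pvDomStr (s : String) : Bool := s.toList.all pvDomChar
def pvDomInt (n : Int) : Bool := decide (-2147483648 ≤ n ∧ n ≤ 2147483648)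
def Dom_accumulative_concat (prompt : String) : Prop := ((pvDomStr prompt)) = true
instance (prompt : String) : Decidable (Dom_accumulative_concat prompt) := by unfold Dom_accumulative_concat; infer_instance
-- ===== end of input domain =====

-- B rebuilds each prefix from scratch with " ".join over a slice instead of A's running accumulator; same values, simpler decomposition.

-- ===== PORT A =====
-- split "<br>", strip each piece; then loop keeping cur_prompt, appending cur_prompt + " " + p each step
def accumulative_concat (prompt : String) : List String :=
  let prompts := (PySem.Chars.splitOn prompt.toList ("<br>".toList)).map PySem.Chars.strip
  match prompts with
  | [] => []  -- unreachable: split always returns a nonempty list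
  | p0 :: rest =>
    let st := rest.foldl
      (fun (st : List (List Char) × List Char) p =>
        (st.1 ++ [st.2 ++ [' '] ++ p], st.2 ++ [' '] ++ p)) ([p0], p0)
    st.1.map String.ofList

-- ===== PORT B =====
-- parts as in A; result = [" ".join(parts[:i+1]) for i in range(len(parts))]
def accumulative_concat_alt (prompt : String) : List String :=
  let parts := (PySem.Chars.splitOn prompt.toList ("<br>".toList)).map PySem.Chars.strip
  (List.range parts.length).map (fun (i : Nat) =>
    String.ofList (PySem.Chars.join [' '] (PySem.List.slice parts none (some ((i : Int) + 1)))))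

-- ===== PRECONDITION & SPEC =====
def Spec_accumulative_concat (prompt : String) (out : List String) : Prop := out = accumulative_concat_alt prompt
instance (prompt : String) (out : List String) : Decidable (Spec_accumulative_concat prompt out) := by unfold Spec_accumulative_concat; infer_instance

-- ===== CLAIM (what is proved, stated in full; the proofs are below) =====
def Claim_equal_accumulative_concat : Prop := ∀ (prompt : String), Dom_accumulative_concat prompt → Spec_accumulative_concat prompt (accumulative_concat prompt)

-- ===== LEMMAS AND PROOFS =====

-- the list of joined prefixes A's loop produces, as a recursion
def pjAux (cur : List Char) : List (List Char) → List (List Char)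
  | [] => []
  | p :: ps => (cur ++ [' '] ++ p) :: pjAux (cur ++ [' '] ++ p) ps

-- the final cur_prompt
def lcAux (cur : List Char) : List (List Char) → List Char
  | [] => cur
  | p :: ps => lcAux (cur ++ [' '] ++ p) ps

theorem fold_eq (rest : List (List Char)) :
    ∀ (acc : List (List Char)) (cur : List Char),
      rest.foldl (fun (st : List (List Char) × List Char) p =>
        (st.1 ++ [st.2 ++ [' '] ++ p], st.2 ++ [' '] ++ p)) (acc, cur)
      = (acc ++ pjAux cur rest, lcAux cur rest) := by
  induction rest with
  | nil => intro acc cur; simp [pjAux, lcAux]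
  | cons p ps ih =>
    intro acc cur
    rw [List.foldl_cons, ih]
    simp [pjAux, lcAux, List.append_assoc]

theorem join_space_cons (cur p : List Char) (xs : List (List Char)) :
    PySem.Chars.join [' '] ((cur ++ [' '] ++ p) :: xs)
      = PySem.Chars.join [' '] (cur :: p :: xs) := by
  cases xs with
  | nil => simp [PySem.Chars.join_singleton, PySem.Chars.join_cons_cons]
  | cons y ys =>
    simp [PySem.Chars.join_cons_cons, List.append_assoc]

theorem pjAux_eq_map (rest : List (List Char)) :
    ∀ cur : List Char,
      pjAux cur rest
        = (List.range rest.length).map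
            (fun i => PySem.Chars.join [' '] (cur :: rest.take (i + 1))) := by
  induction rest with
  | nil => intro cur; simp [pjAux]
  | cons p ps ih =>
    intro cur
    simp only [pjAux, List.length_cons, List.range_succ_eq_map, List.map_cons, List.map_map]
    congr 1
    · simp [PySem.Chars.join_cons_cons, PySem.Chars.join_singleton]
    · rw [ih (cur ++ [' '] ++ p)]
      refine List.map_congr_left ?_
      intro i _
      simp only [Function.comp, Nat.succ_eq_add_one, List.take_succ_cons]
      exact join_space_cons cur p (ps.take (i + 1))

theorem prefixes_eq (p0 : List Char) (rest : List (List Char)) :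
    p0 :: pjAux p0 rest
      = (List.range (rest.length + 1)).map
          (fun i => PySem.Chars.join [' '] ((p0 :: rest).take (i + 1))) := by
  simp only [List.range_succ_eq_map, List.map_cons, List.map_map]
  congr 1
  · simp [PySem.Chars.join_singleton]
  · rw [pjAux_eq_map rest p0]
    refine List.map_congr_left ?_
    intro i _
    simp [Function.comp]

-- ===== VERDICT (by name: the statement is the Claim_ definition above) =====
theorem accumulative_concat_spec : Claim_equal_accumulative_concat := by
  intro prompt _
  unfold Spec_accumulative_concat accumulative_concat accumulative_concat_alt
  cases h : (PySem.Chars.splitOn prompt.toList ("<br>".toList)).map PySem.Chars.strip with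
  | nil => simp
  | cons p0 rest =>
    simp only [fold_eq, List.singleton_append]
    have hslice : ∀ i : Nat,
        PySem.List.slice (p0 :: rest) none (some ((i : Int) + 1)) = (p0 :: rest).take (i + 1) := by
      intro i
      rw [PySem.List.slice_to (p0 :: rest) (by positivity)]
      norm_num
    have key : (p0 :: pjAux p0 rest)
        = (List.range (rest.length + 1)).map
            (fun (i : Nat) => PySem.Chars.join [' '] (PySem.List.slice (p0 :: rest) none (some ((i : Int) + 1)))) := by
      rw [prefixes_eq]
      refine List.map_congr_left ?_
      intro i _
      rw [hslice]
    simp only [List.length_cons]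
    rw [key, List.map_map]
    rfl
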